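-- pv_equiv track=rewrite | github.com/wmgeolab/scope-ml | ml-api/src/ml_api/ingestion/naive/gef_documents.py | select_document_types
-- ===== SOURCE A (Python) =====
-- from enum import Enum
-- from typing import List
--
-- class DocumentType(str, Enum):
--     CEO_ENDORSEMENT = "CEO Endorsement"
--     REVIEW_SHEET_CEO_ENDORSEMENT = "Review Sheet for CEO Endorsement"
--     PROJECT_IMPLEMENTATION_REPORT = "Project Implementation Report (PIR)"
--     PROJECT_IDENTIFICATION_FORM = "Project Identification Form (PIF)"
--     REVIEW_SHEET_PIF = "Review Sheet for PIF"
--     STAP_REVIEW = "STAP Review"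
--     AGENCY_PROJECT_DOCUMENT = "Agency Project Document"
--     FSP_PIF_DOCUMENT = "FSP PIF Document"
--     FSP_CEO_ENDORSEMENT_DOCUMENT = "FSP CEO Endorsement Document"
--     MSP_CEO_APPROVAL_DOCUMENT = "MSP CEO Approval Document"
--     MSP_PIF_DOCUMENT = "MSP PIF Document"
--     CEO_PIF_CLEARANCE_LETTER = "CEO PIF Clearance Letter"
--     CEO_ENDORSEMENT_LETTER = "CEO Endorsement Letter"
--     PPG_APPROVAL_LETTER = "PPG Approval Letter"
--     MIDTERM_REVIEW = "Midterm Review (MTR)"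
--     CHILD_FSP_CEO_ENDORSEMENT_DOCUMENT = "Child FSP CEO Endorsement Document"
--     COUNCIL_NOTIFICATION_LETTER = "Council Notification Letter"
--     PPG_DOCUMENT = "PPG Document"
--     ANNEXES_APPENDIXES = "Annexes/Appendixes to Project Documents"
--     AGENCY_RESPONSE_MATRIX = "Agency Response Matrix"
--     UNKNOWN = "Unknown"
--
-- def select_document_types(available_types: List[DocumentType]) -> List[DocumentType]:
--     selected_types = []
--
--     # Priority order based on the email
--     priority_order = [
--         # DocumentType.TERMINAL_EVALUATION,
--         DocumentType.MIDTERM_REVIEW,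
--         DocumentType.PROJECT_IMPLEMENTATION_REPORT,
--         DocumentType.CEO_ENDORSEMENT,
--     ]
--
--     # First, check for the highest priority document available
--     for doc_type in priority_order:
--         if doc_type in available_types:
--             selected_types.append(doc_type)
--             break
--
--     # If we selected a PIR, also include CEO Endorsement if available
--     if (
--         selected_types
--         and selected_types[0] == DocumentType.PROJECT_IMPLEMENTATION_REPORT
--     ):
--         if DocumentType.CEO_ENDORSEMENT in available_types:
--             selected_types.append(DocumentType.CEO_ENDORSEMENT)
--
--     # If we only have CEO Endorsement, include it
--     if not selected_types and DocumentType.CEO_ENDORSEMENT in available_types: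
--         selected_types.append(DocumentType.CEO_ENDORSEMENT)
--
--     # Include any other available monitoring or evaluation reports
--     for doc_type in priority_order:
--         if doc_type in available_types and doc_type not in selected_types:
--             selected_types.append(doc_type)
--
--     return selected_types
-- ===== SOURCE B (Python) =====
-- from enum import Enum
-- from typing import List
--
-- class DocumentType(str, Enum):
--     CEO_ENDORSEMENT = "CEO Endorsement"
--     REVIEW_SHEET_CEO_ENDORSEMENT = "Review Sheet for CEO Endorsement"
--     PROJECT_IMPLEMENTATION_REPORT = "Project Implementation Report (PIR)"
--     PROJECT_IDENTIFICATION_FORM = "Project Identification Form (PIF)"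
--     REVIEW_SHEET_PIF = "Review Sheet for PIF"
--     STAP_REVIEW = "STAP Review"
--     AGENCY_PROJECT_DOCUMENT = "Agency Project Document"
--     FSP_PIF_DOCUMENT = "FSP PIF Document"
--     FSP_CEO_ENDORSEMENT_DOCUMENT = "FSP CEO Endorsement Document"
--     MSP_CEO_APPROVAL_DOCUMENT = "MSP CEO Approval Document"
--     MSP_PIF_DOCUMENT = "MSP PIF Document"
--     CEO_PIF_CLEARANCE_LETTER = "CEO PIF Clearance Letter"
--     CEO_ENDORSEMENT_LETTER = "CEO Endorsement Letter"
--     PPG_APPROVAL_LETTER = "PPG Approval Letter"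
--     MIDTERM_REVIEW = "Midterm Review (MTR)"
--     CHILD_FSP_CEO_ENDORSEMENT_DOCUMENT = "Child FSP CEO Endorsement Document"
--     COUNCIL_NOTIFICATION_LETTER = "Council Notification Letter"
--     PPG_DOCUMENT = "PPG Document"
--     ANNEXES_APPENDIXES = "Annexes/Appendixes to Project Documents"
--     AGENCY_RESPONSE_MATRIX = "Agency Response Matrix"
--     UNKNOWN = "Unknown"
--
-- def select_document_types(available_types: List[DocumentType]) -> List[DocumentType]:
--     # A's break-then-augment control flow collapses to a single filter of the
--     # fixed priority sequence by availability (the PIR->CEO special case and the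
--     # "only CEO" block never change the outcome, since CEO is already last in
--     # the priority list).
--     priority_order = [
--         DocumentType.MIDTERM_REVIEW,
--         DocumentType.PROJECT_IMPLEMENTATION_REPORT,
--         DocumentType.CEO_ENDORSEMENT,
--     ]
--     return [dt for dt in priority_order if dt in available_types]
-- ===== Notes on version B (the rewrite author's own statement) =====
-- stated objective: simpler
-- what changed: A's four special-cased passes (break-first-match, PIR-then-CEO augmentation, an only-CEO block that is dead, and a final augment loop) are collapsed into one filter of the fixed priority sequence by membership in available_types.
import Mathlib
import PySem

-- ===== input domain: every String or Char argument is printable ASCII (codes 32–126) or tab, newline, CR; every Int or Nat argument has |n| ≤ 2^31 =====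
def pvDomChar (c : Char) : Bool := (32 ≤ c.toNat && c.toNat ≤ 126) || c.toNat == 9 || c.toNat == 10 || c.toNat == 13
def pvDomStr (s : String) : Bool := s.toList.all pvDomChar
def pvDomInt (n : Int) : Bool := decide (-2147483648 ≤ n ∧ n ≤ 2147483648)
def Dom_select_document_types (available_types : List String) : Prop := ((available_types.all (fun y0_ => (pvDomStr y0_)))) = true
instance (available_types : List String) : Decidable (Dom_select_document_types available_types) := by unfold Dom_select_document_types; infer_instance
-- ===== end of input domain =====

-- B collapses A's break-first-match + augment-later multi-pass control flow into a single
-- filter of the fixed priority sequence by availability (objective: simpler).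


-- ===== PORT A =====
-- Literal transliteration of A: first loop with break (= find first present),
-- then the PIR→CEO augmentation, the only-CEO block, and the final augment loop.
def select_document_types (available_types : List String) : List String :=
  let priority_order : List String :=
    ["Midterm Review (MTR)", "Project Implementation Report (PIR)", "CEO Endorsement"]
  -- for doc_type in priority_order: if doc_type in available_types: append; break
  let selected_types : List String :=
    match priority_order.find? (fun d => available_types.contains d) with
    | some d => [d]
    | none => []
  -- if selected_types and selected_types[0] == PIR: append CEO if available
  let selected_types :=
    if selected_types ≠ [] ∧ selected_types.head? = some "Project Implementation Report (PIR)" then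
      if available_types.contains "CEO Endorsement" then
        selected_types ++ ["CEO Endorsement"]
      else selected_types
    else selected_types
  -- if not selected_types and CEO in available_types: append CEO
  let selected_types :=
    if selected_types = [] ∧ available_types.contains "CEO Endorsement" then
      selected_types ++ ["CEO Endorsement"]
    else selected_types
  -- final loop: append each priority type that is available and not yet selected
  priority_order.foldl
    (fun acc d =>
      if available_types.contains d ∧ ¬ acc.contains d then acc ++ [d] else acc)
    selected_types

-- ===== PORT B =====
def select_document_types_alt (available_types : List String) : List String :=
  let priority_order : List String :=
    ["Midterm Review (MTR)", "Project Implementation Report (PIR)", "CEO Endorsement"]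
  priority_order.filter (fun dt => available_types.contains dt)

-- ===== PRECONDITION & SPEC =====
def Spec_select_document_types (available_types : List String) (out : List String) : Prop := out = select_document_types_alt available_types
instance (available_types : List String) (out : List String) : Decidable (Spec_select_document_types available_types out) := by unfold Spec_select_document_types; infer_instance

-- ===== CLAIM (what is proved, stated in full; the proofs are below) =====
def Claim_equal_select_document_types : Prop := ∀ (available_types : List String), Dom_select_document_types available_types → Spec_select_document_types available_types (select_document_types available_types)

-- ===== LEMMAS AND PROOFS =====

-- ===== VERDICT (by name: the statement is the Claim_ definition above) =====
theorem select_document_types_spec : Claim_equal_select_document_types := by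
  intro av _
  unfold Spec_select_document_types select_document_types select_document_types_alt
  by_cases h1 : "Midterm Review (MTR)" ∈ av <;>
    by_cases h2 : "Project Implementation Report (PIR)" ∈ av <;>
      by_cases h3 : "CEO Endorsement" ∈ av <;>
        simp only [List.contains_eq_mem, List.find?, List.foldl, List.filter,
          h1, h2, h3, decide_true, decide_false, ne_eq] <;> simp [h1, h2, h3]
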